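-- pv_equiv track=rewrite | github.com/natestemen/fourier | plot_ac_family_weyl.py | _random_w_triples
-- ===== SOURCE A (Python) =====
-- def _random_w_triples(max_size: int, w_min: int) -> list[tuple[int, int, int]]:
--     triples: list[tuple[int, int, int]] = []
--     for w3 in range(w_min, max_size // 3 + 1):
--         max_w2 = (max_size - 3 * w3) // 2
--         for w2 in range(w_min, max_w2 + 1):
--             max_w1 = max_size - 2 * w2 - 3 * w3
--             for w1 in range(w_min, max_w1 + 1):
--                 triples.append((w1, w2, w3))
--     return triples
-- ===== SOURCE B (Python) =====
-- def _random_w_triples(max_size: int, w_min: int) -> list[tuple[int, int, int]]: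
--     # Generic weighted-composition generator: recursion over the weight list
--     # [3, 2, 1], each level spending budget // weight and appending its value
--     # at the end of the partial tuple (built back-to-front).
--     def gen(weights: list[int], budget: int) -> list[list[int]]:
--         if not weights:
--             return [[]]
--         w = weights[0]
--         out: list[list[int]] = []
--         for v in range(w_min, budget // w + 1):
--             for t in gen(weights[1:], budget - w * v):
--                 out.append(t + [v])
--         return out
--
--     return [(t[0], t[1], t[2]) for t in gen([3, 2, 1], max_size)]
-- ===== Notes on version B (the rewrite author's own statement) =====
-- stated objective: alternative
-- what changed: A is three hardwired nested loops with per-level precomputed tight bounds; B is a generic recursive weighted-composition generator over the weight list [3,2,1], each recursion level spending budget//weight and building the tuples back-to-front.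
import Mathlib
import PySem

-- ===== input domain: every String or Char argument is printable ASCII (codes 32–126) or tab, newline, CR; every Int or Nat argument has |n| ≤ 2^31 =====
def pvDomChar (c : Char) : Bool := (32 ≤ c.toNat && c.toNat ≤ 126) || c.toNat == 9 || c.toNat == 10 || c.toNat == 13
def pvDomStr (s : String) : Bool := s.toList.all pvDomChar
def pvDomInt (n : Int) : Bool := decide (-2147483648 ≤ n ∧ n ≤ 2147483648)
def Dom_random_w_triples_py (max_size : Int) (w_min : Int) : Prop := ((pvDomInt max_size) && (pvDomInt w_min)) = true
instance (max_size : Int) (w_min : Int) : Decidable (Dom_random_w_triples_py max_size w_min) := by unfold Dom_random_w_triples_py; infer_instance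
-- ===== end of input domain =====

-- B replaces A's three hardwired nested loops with tight precomputed bounds by a generic
-- recursive weighted-composition generator over the weight list [3,2,1] that builds the
-- tuples back-to-front (objective: alternative, same output order).

-- ===== PORT A =====
-- literal port of _random_w_triples: three nested for-loops appending to `triples`
-- (the growing list is an Array so that `.append` is O(1) as in Python; max_w2/max_w1 inlined)
def random_w_triples_py (max_size : Int) (w_min : Int) : List (Int × Int × Int) :=
  ((PySem.List.pyRange w_min (PySem.Int.floordiv max_size 3 + 1) 1).foldl (fun acc w3 =>
    (PySem.List.pyRange w_min (PySem.Int.floordiv (max_size - 3 * w3) 2 + 1) 1).foldl (fun acc w2 =>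
      (PySem.List.pyRange w_min (max_size - 2 * w2 - 3 * w3 + 1) 1).foldl
        (fun (acc : Array (Int × Int × Int)) w1 =>
        acc.push (w1, w2, w3)) acc) acc) #[]).toList

-- ===== PORT B =====
-- literal port of Source B's `gen`: structural recursion over the weight list; each level
-- iterates v over range(w_min, budget // w + 1) and appends v at the end of each partial tuple
def pvGen (w_min : Int) : List Int → Int → List (List Int)
  | [], _ => [[]]
  | w :: rest, budget =>
    (PySem.List.pyRange w_min (PySem.Int.floordiv budget w + 1) 1).foldl (fun out v =>
      (pvGen w_min rest (budget - w * v)).foldl (fun out t => out ++ [t ++ [v]]) out) []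

-- literal port of Source B's final comprehension '(t[0], t[1], t[2])'; the wildcard branch is a
-- totality default only — gen over 3 weights always yields length-3 lists
def random_w_triples_py_alt (max_size : Int) (w_min : Int) : List (Int × Int × Int) :=
  (pvGen w_min [3, 2, 1] max_size).map (fun t =>
    match t with
    | [a, b, c] => (a, b, c)
    | _ => (0, 0, 0))

-- ===== PRECONDITION & SPEC =====
def Spec_random_w_triples_py (max_size : Int) (w_min : Int) (out : List (Int × Int × Int)) : Prop := out = random_w_triples_py_alt max_size w_min
instance (max_size : Int) (w_min : Int) (out : List (Int × Int × Int)) : Decidable (Spec_random_w_triples_py max_size w_min out) := by unfold Spec_random_w_triples_py; infer_instance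

-- ===== CLAIM =====
def Claim_equal_random_w_triples_py : Prop := ∀ (max_size : Int) (w_min : Int), Dom_random_w_triples_py max_size w_min → Spec_random_w_triples_py max_size w_min (random_w_triples_py max_size w_min)

-- ===== LEMMAS AND PROOFS =====

-- an Array-valued foldl seen through .toList is the corresponding List-valued foldl
lemma pv_foldl_toList {α : Type} (g : Array α → Int → Array α) (g' : List α → Int → List α)
    (h : ∀ a x, (g a x).toList = g' a.toList x) :
    ∀ (l : List Int) (acc : Array α), (l.foldl g acc).toList = l.foldl g' acc.toList := by
  intro l
  induction l with
  | nil => intro acc; rfl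
  | cons x xs ih => intro acc; simp only [List.foldl_cons, ih, h]

lemma pv_lvl1 (m w w3 w2 : Int) (a : Array (Int × Int × Int)) :
    ((PySem.List.pyRange w (m - 2 * w2 - 3 * w3 + 1) 1).foldl
        (fun acc w1 => acc.push (w1, w2, w3)) a).toList =
      a.toList ++ (PySem.List.pyRange w (m - 2 * w2 - 3 * w3 + 1) 1).map (fun w1 => (w1, w2, w3)) := by
  rw [pv_foldl_toList (fun acc w1 => acc.push (w1, w2, w3)) (fun acc w1 => acc ++ [(w1, w2, w3)])
    (fun a x => by simp)]
  exact PySem.List.foldl_append_singleton_eq_map _ _ _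

lemma pv_lvl2 (m w w3 : Int) (a : Array (Int × Int × Int)) :
    ((PySem.List.pyRange w (PySem.Int.floordiv (m - 3 * w3) 2 + 1) 1).foldl (fun acc w2 =>
        (PySem.List.pyRange w (m - 2 * w2 - 3 * w3 + 1) 1).foldl
          (fun acc w1 => acc.push (w1, w2, w3)) acc) a).toList =
      a.toList ++ (PySem.List.pyRange w (PySem.Int.floordiv (m - 3 * w3) 2 + 1) 1).flatMap (fun w2 =>
        (PySem.List.pyRange w (m - 2 * w2 - 3 * w3 + 1) 1).map (fun w1 => (w1, w2, w3))) := by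
  rw [pv_foldl_toList _
    (fun acc w2 => acc ++ (PySem.List.pyRange w (m - 2 * w2 - 3 * w3 + 1) 1).map
      (fun w1 => (w1, w2, w3)))
    (fun a w2 => pv_lvl1 m w w3 w2 a)]
  exact PySem.List.foldl_append_eq_flatMap _ _ _

-- A as a flatMap over its tight ranges
lemma pv_a_eq (m w : Int) :
    random_w_triples_py m w =
      (PySem.List.pyRange w (PySem.Int.floordiv m 3 + 1) 1).flatMap (fun w3 =>
        (PySem.List.pyRange w (PySem.Int.floordiv (m - 3 * w3) 2 + 1) 1).flatMap (fun w2 =>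
          (PySem.List.pyRange w (m - 2 * w2 - 3 * w3 + 1) 1).map (fun w1 => (w1, w2, w3)))) := by
  unfold random_w_triples_py
  rw [pv_foldl_toList _
    (fun acc w3 => acc ++ (PySem.List.pyRange w (PySem.Int.floordiv (m - 3 * w3) 2 + 1) 1).flatMap
      (fun w2 => (PySem.List.pyRange w (m - 2 * w2 - 3 * w3 + 1) 1).map (fun w1 => (w1, w2, w3))))
    (fun a w3 => pv_lvl2 m w w3 a)]
  rw [PySem.List.foldl_append_eq_flatMap]
  rfl

-- one `gen` level, its two appending loops rewritten as flatMap/map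
lemma pv_gen_cons (wmn w budget : Int) (rest : List Int) :
    pvGen wmn (w :: rest) budget =
      (PySem.List.pyRange wmn (PySem.Int.floordiv budget w + 1) 1).flatMap (fun v =>
        (pvGen wmn rest (budget - w * v)).map (fun t => t ++ [v])) := by
  show (PySem.List.pyRange wmn (PySem.Int.floordiv budget w + 1) 1).foldl (fun out v =>
      (pvGen wmn rest (budget - w * v)).foldl (fun out t => out ++ [t ++ [v]]) out) [] = _
  rw [show (fun out v => (pvGen wmn rest (budget - w * v)).foldl
        (fun (out : List (List Int)) t => out ++ [t ++ [v]]) out) =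
      (fun out v => out ++ (pvGen wmn rest (budget - w * v)).map (fun t => t ++ [v])) from
    funext fun out => funext fun v => PySem.List.foldl_append_singleton_eq_map _ _ _]
  exact PySem.List.foldl_append_eq_flatMap _ _ _

lemma pv_floordiv_one (b : Int) : PySem.Int.floordiv b 1 = b := by
  rw [PySem.Int.floordiv_eq_ediv_of_pos (by norm_num)]; exact Int.ediv_one b

-- ===== VERDICT =====
theorem random_w_triples_py_spec : Claim_equal_random_w_triples_py := by
  intro m w _
  unfold Spec_random_w_triples_py random_w_triples_py_alt
  rw [pv_a_eq]
  rw [pv_gen_cons, List.map_flatMap]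
  refine (List.flatMap_congr ?_).symm
  intro w3 _
  rw [pv_gen_cons, List.map_flatMap, List.map_flatMap]
  refine (List.flatMap_congr ?_).symm
  intro w2 _
  rw [pv_gen_cons, pv_floordiv_one,
    show m - 3 * w3 - 2 * w2 = m - 2 * w2 - 3 * w3 from by ring]
  simp only [pvGen]
  induction PySem.List.pyRange w (m - 2 * w2 - 3 * w3 + 1) 1 with
  | nil => rfl
  | cons x xs ih => simpa using ih
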